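-- pv_equiv track=rewrite | github.com/Anvesh1909/Python-Full-Stack | Introduction to Python/WhatsappQuestions/FQ.py | NthLargest
-- ===== SOURCE A (Python) =====
-- def NthLargest(L,n):
--     Largest = []
--     for i in range(n):
--         m = 0
--         for i in L:
--             if i not in Largest and m < i:
--                 m = i
--
--         Largest += [m]
--     return Largest[n-1]
-- ===== SOURCE B (Python) =====
-- def NthLargest(L, n):
--     ranked = sorted({x for x in L if x > 0}, reverse=True)
--     return ranked[n - 1] if n - 1 < len(ranked) else 0
-- ===== Notes on version B (the rewrite author's own statement) =====
-- stated objective: faster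
-- what changed: Replaces n repeated max-scans over L (each with a membership scan of the growing result list) by one dedup + one descending sort of the distinct positive values, then a single index with a 0 fallback.
import Mathlib
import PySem

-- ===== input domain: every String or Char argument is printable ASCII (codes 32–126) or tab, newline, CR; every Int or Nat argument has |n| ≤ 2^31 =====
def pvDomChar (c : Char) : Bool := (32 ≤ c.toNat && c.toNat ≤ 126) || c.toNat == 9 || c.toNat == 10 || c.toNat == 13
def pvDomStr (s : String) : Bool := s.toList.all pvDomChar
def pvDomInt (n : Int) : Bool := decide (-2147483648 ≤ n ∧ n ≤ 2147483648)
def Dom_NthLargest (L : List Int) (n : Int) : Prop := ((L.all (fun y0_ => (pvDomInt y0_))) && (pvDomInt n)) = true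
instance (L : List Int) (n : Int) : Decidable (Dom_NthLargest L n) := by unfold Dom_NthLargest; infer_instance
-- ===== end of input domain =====

-- B replaces A's n repeated filtered max-scans by one dedup + one descending sort and a single index (faster).

-- ===== PORT A =====
-- inner 'for i in L' loop of A: running max m over elements not yet collected
def pvInnerA (L : List Int) (Largest : List Int) : Int :=
  L.foldl (fun m i => if i ∉ Largest ∧ m < i then i else m) 0

def NthLargest (L : List Int) (n : Int) : Int :=
  let Largest := (PySem.List.pyRange 0 n 1).foldl
    (fun Largest _ => Largest ++ [pvInnerA L Largest]) []
  PySem.List.pyGetD Largest (n - 1) 0   -- Largest[n-1]; Pre_ guarantees the index is in range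

-- ===== PORT B =====
def NthLargest_alt (L : List Int) (n : Int) : Int :=
  let ranked := PySem.List.sorted (PySem.Set.ofList (L.filter (fun x => 0 < x))) (fun x => x) true
  if n - 1 < (ranked.length : Int) then PySem.List.pyGetD ranked (n - 1) 0 else 0

-- ===== PRECONDITION & SPEC =====
-- A raises IndexError (Largest[n-1] on the empty list) exactly when n ≤ 0; Pre_ excludes only those inputs.
def Pre_NthLargest (L : List Int) (n : Int) : Prop := 1 ≤ n
instance (L : List Int) (n : Int) : Decidable (Pre_NthLargest L n) := by unfold Pre_NthLargest; infer_instance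
def pvWitness_NthLargest : List Int × Int := ([3, 1, 3, -2, 5], 2)
def Spec_NthLargest (L : List Int) (n : Int) (out : Int) : Prop := out = NthLargest_alt L n
instance (L : List Int) (n : Int) (out : Int) : Decidable (Spec_NthLargest L n out) := by unfold Spec_NthLargest; infer_instance

-- ===== CLAIM (what is proved, stated in full; the proofs are below) =====
def Claim_equal_NthLargest : Prop := ∀ (L : List Int) (n : Int), Dom_NthLargest L n → Pre_NthLargest L n → Spec_NthLargest L n (NthLargest L n)

-- ===== LEMMAS AND PROOFS =====

-- the distinct positive values of L in strictly decreasing order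
def pvRanked (L : List Int) : List Int :=
  PySem.List.sorted (PySem.Set.ofList (L.filter (fun x => 0 < x))) (fun x => x) true

theorem pvRanked_mem {L : List Int} {x : Int} : x ∈ pvRanked L ↔ x ∈ L ∧ 0 < x := by
  simp [pvRanked, PySem.List.mem_sorted, PySem.Set.mem_ofList, List.mem_filter]

theorem pvRanked_nodup (L : List Int) : (pvRanked L).Nodup :=
  ((PySem.List.sorted_perm _ _ _).nodup_iff).2 (PySem.Set.nodup_ofList _)

theorem pvRanked_sorted (L : List Int) : (pvRanked L).Pairwise (fun a b => b < a) := by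
  have h1 : (pvRanked L).Pairwise (fun a b : Int => b ≤ a) :=
    PySem.List.sorted_pairwise_rev _ _
  have h2 := pvRanked_nodup L
  exact (h1.and h2).imp (fun h => lt_of_le_of_ne h.1 (Ne.symm h.2))

-- characterisation of A's inner loop result
theorem pvInnerA_foldl_spec (S : List Int) :
    ∀ (L : List Int) (m0 : Int),
      let r := L.foldl (fun m i => if i ∉ S ∧ m < i then i else m) m0
      m0 ≤ r ∧ (r = m0 ∨ (r ∈ L ∧ r ∉ S)) ∧ (∀ x ∈ L, x ∉ S → x ≤ r) := by
  intro L
  induction L with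
  | nil => intro m0; exact ⟨le_refl _, Or.inl rfl, by simp⟩
  | cons a L ih =>
    intro m0
    simp only [List.foldl_cons]
    by_cases h : a ∉ S ∧ m0 < a
    · simp only [if_pos h]
      obtain ⟨hle, hmem, hub⟩ := ih a
      refine ⟨le_of_lt (lt_of_lt_of_le h.2 hle), ?_, ?_⟩
      · rcases hmem with h' | h'
        · exact Or.inr ⟨by simp [h'], by rw [h']; exact h.1⟩
        · exact Or.inr ⟨List.mem_cons_of_mem _ h'.1, h'.2⟩
      · intro x hx hxS
        rcases List.mem_cons.1 hx with rfl | hx'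
        · exact hle
        · exact hub x hx' hxS
    · simp only [if_neg h]
      obtain ⟨hle, hmem, hub⟩ := ih m0
      refine ⟨hle, ?_, ?_⟩
      · rcases hmem with h' | h'
        · exact Or.inl h'
        · exact Or.inr ⟨List.mem_cons_of_mem _ h'.1, h'.2⟩
      · intro x hx hxS
        rcases List.mem_cons.1 hx with rfl | hx'
        · push_neg at h; exact le_trans (h hxS) hle
        · exact hub x hx' hxS

theorem pvInnerA_spec (L S : List Int) :
    0 ≤ pvInnerA L S ∧ (pvInnerA L S = 0 ∨ (pvInnerA L S ∈ L ∧ pvInnerA L S ∉ S)) ∧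
      (∀ x ∈ L, x ∉ S → x ≤ pvInnerA L S) :=
  pvInnerA_foldl_spec S L 0

-- ranked is strictly decreasing in indices
theorem pvRanked_lt_of_index {L : List Int} {i j : Nat} (hi : i < j)
    (hj : j < (pvRanked L).length) : (pvRanked L)[j] < (pvRanked L)[i]'(lt_trans hi hj) :=
  (List.pairwise_iff_getElem.1 (pvRanked_sorted L)) i j _ hj hi

-- state of A's outer loop after k iterations
def pvStateA (L : List Int) (k : Nat) : List Int :=
  (pvRanked L).take k ++ List.replicate (k - (pvRanked L).length) 0

theorem pvInnerA_of_lt {L : List Int} {k : Nat} (hk : k < (pvRanked L).length) :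
    pvInnerA L (pvStateA L k) = (pvRanked L)[k] := by
  obtain ⟨hge, hmem, hub⟩ := pvInnerA_spec L (pvStateA L k)
  set r := pvInnerA L (pvStateA L k) with hr
  have hknotS : (pvRanked L)[k] ∉ pvStateA L k := by
    intro hin
    have hpos : (0:Int) < (pvRanked L)[k] := (pvRanked_mem.1 (List.getElem_mem hk)).2
    simp only [pvStateA, List.mem_append, List.mem_replicate] at hin
    rcases hin with hin | hin
    · obtain ⟨i, hi, hival⟩ := List.mem_take_iff_getElem.1 hin
      have hilt : i < k := by omega
      exact absurd (hival ▸ pvRanked_lt_of_index hilt hk) (lt_irrefl _)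
    · omega
  have hkle : (pvRanked L)[k] ≤ r :=
    hub _ (pvRanked_mem.1 (List.getElem_mem hk)).1 hknotS
  have hrpos : 0 < r := lt_of_lt_of_le (pvRanked_mem.1 (List.getElem_mem hk)).2 hkle
  rcases hmem with h0 | ⟨hrL, hrS⟩
  · omega
  · -- r is a positive element of L, hence in ranked; not in take k, hence index ≥ k
    have hrR : r ∈ pvRanked L := pvRanked_mem.2 ⟨hrL, hrpos⟩
    obtain ⟨j, hj, hjval⟩ := List.mem_iff_getElem.1 hrR
    have hjk : k ≤ j := by
      by_contra hlt
      exact hrS (by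
        simp only [pvStateA, List.mem_append]
        exact Or.inl (hjval ▸ List.mem_take_iff_getElem.2 ⟨j, by omega, rfl⟩))
    have : r ≤ (pvRanked L)[k] := by
      rcases Nat.eq_or_lt_of_le hjk with rfl | hlt
      · exact le_of_eq hjval.symm
      · exact le_of_lt (hjval ▸ pvRanked_lt_of_index hlt hj)
    omega

theorem pvInnerA_of_ge {L : List Int} {k : Nat} (hk : (pvRanked L).length ≤ k) :
    pvInnerA L (pvStateA L k) = 0 := by
  obtain ⟨hge, hmem, hub⟩ := pvInnerA_spec L (pvStateA L k)
  rcases hmem with h0 | ⟨hrL, hrS⟩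
  · exact h0
  · set r := pvInnerA L (pvStateA L k) with hr
    rcases lt_or_eq_of_le hge with hpos | h0
    · exfalso
      apply hrS
      simp only [pvStateA, List.mem_append]
      exact Or.inl (by rw [List.take_of_length_le hk]; exact pvRanked_mem.2 ⟨hrL, hpos⟩)
    · omega

theorem pvStateA_succ (L : List Int) (k : Nat) :
    pvStateA L k ++ [pvInnerA L (pvStateA L k)] = pvStateA L (k + 1) := by
  by_cases hk : k < (pvRanked L).length
  · rw [pvInnerA_of_lt hk]
    simp only [pvStateA, Nat.sub_eq_zero_of_le (le_of_lt hk),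
      Nat.sub_eq_zero_of_le hk, List.replicate_zero, List.append_nil]
    exact (List.take_succ_eq_append_getElem hk).symm
  · push_neg at hk
    rw [pvInnerA_of_ge hk]
    simp only [pvStateA, List.take_of_length_le hk, List.take_of_length_le (le_trans hk (Nat.le_succ k)),
      List.append_assoc]
    congr 1
    rw [← List.replicate_succ' ]
    congr 1
    omega

-- a foldl whose body ignores the list element iterates a step-function length-many times
theorem pvFoldl_const {α β : Type} (g : α → α) :
    ∀ (l : List β) (init : α), l.foldl (fun s _ => g s) init = g^[l.length] init := by
  intro l
  induction l with
  | nil => intro init; rfl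
  | cons a l ih =>
    intro init
    simp [List.foldl_cons, ih, Function.iterate_succ_apply]

theorem pvStateA_iterate (L : List Int) :
    ∀ k : Nat, (fun S => S ++ [pvInnerA L S])^[k] ([] : List Int) = pvStateA L k := by
  intro k
  induction k with
  | zero => simp [pvStateA]
  | succ k ih =>
    rw [Function.iterate_succ_apply', ih]
    exact pvStateA_succ L k

theorem pvLargest_eq (L : List Int) (n : Int) :
    (PySem.List.pyRange 0 n 1).foldl (fun Largest _ => Largest ++ [pvInnerA L Largest]) []
      = pvStateA L n.toNat := by
  rw [pvFoldl_const (fun S => S ++ [pvInnerA L S]) (PySem.List.pyRange 0 n 1) []]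
  rw [PySem.List.length_pyRange_one]
  simpa using pvStateA_iterate L n.toNat

-- ===== VERDICT (by name: the statement is the Claim_ definition above) =====
theorem NthLargest_spec : Claim_equal_NthLargest := by
  intro L n _ hpre
  unfold Spec_NthLargest NthLargest NthLargest_alt
  have hn : 1 ≤ n := hpre
  rw [pvLargest_eq]
  have hBeq : (have ranked := PySem.List.sorted (PySem.Set.ofList (L.filter (fun x => decide (0 < x)))) (fun x => x) true;
      if n - 1 < (ranked.length : Int) then PySem.List.pyGetD ranked (n - 1) 0 else 0)
      = if n - 1 < ((pvRanked L).length : Int) then PySem.List.pyGetD (pvRanked L) (n - 1) 0 else 0 := rfl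
  rw [hBeq]
  set R := pvRanked L with hR
  have hidx : 0 ≤ n - 1 := by omega
  have hlen : (pvStateA L n.toNat).length = n.toNat := by
    simp only [pvStateA, List.length_append, List.length_take, List.length_replicate]
    omega
  have hin : (n - 1).toNat < (pvStateA L n.toNat).length := by rw [hlen]; omega
  rw [PySem.List.pyGetD_eq_getElem _ _ hidx (by rw [hlen] at hin ⊢; omega)]
  by_cases hc : n - 1 < (R.length : Int)
  · rw [if_pos hc]
    have hlt : (n - 1).toNat < R.length := by omega
    have : (pvStateA L n.toNat)[(n-1).toNat]'hin = R[(n-1).toNat]'hlt := by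
      simp only [pvStateA, ← hR]
      rw [List.getElem_append_left (by simp [List.length_take]; omega)]
      exact List.getElem_take
    rw [this, PySem.List.pyGetD_eq_getElem _ _ hidx (by push_cast; omega)]
  · rw [if_neg hc]
    push_neg at hc
    have hge : R.length ≤ (n - 1).toNat := by omega
    simp only [pvStateA, ← hR]
    rw [List.getElem_append_right (by simp [List.length_take]; omega)]
    simp
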